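-- pv_equiv track=rewrite | github.com/AlfaBettaGamma/3.Liberation-Of-The-State-Of-Squares | lesson_4.py | odometer
-- ===== SOURCE A (Python) =====
-- def odometer(oksana):
--   t = []
--   v = []
--   V = 0
--   T = 0
--   res = 0
--   for i in range(len(oksana)):
--     if(i == 0):
--       v.append(oksana[i])
--     elif(i == 1):
--       t.append(oksana[i])
--     else:
--       if(i%2 == 0):
--         v.append(oksana[i])
--       else:
--         t.append(oksana[i])
--   if(len(v) == len(t)):
--     for i in range(len(v)):
--       if(i == 0):
--         V = v[i]
--         T = t[i]
--       else:
--         V = v[i]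
--         T = t[i] - t[i-1]
--         if(T < 0):
--           T = 0
--       res = (T*V)+res
--   elif(len(v) > len(t)):
--     for i in range(len(t)):
--       if(i == 0):
--         V = v[i]
--         T = t[i]
--       else:
--         V = v[i]
--         T = t[i] - t[i-1]
--         if(T < 0):
--           T = 0
--       res = (T*V)+res
--   return res
-- ===== SOURCE B (Python) =====
-- def odometer(oksana):
--   res = 0
--   prev = 0
--   for k in range(len(oksana) // 2):
--     V = oksana[2 * k]
--     T = oksana[2 * k + 1]
--     dt = T if k == 0 else max(0, T - prev)
--     res += V * dt
--     prev = T
--   return res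
-- ===== Notes on version B (the rewrite author's own statement) =====
-- stated objective: simpler
-- what changed: Drops A's scatter pass into v/t lists and its duplicated length-comparison loops: B makes one pass over index pairs (2k, 2k+1), keeping only a running previous time and an accumulator.
import Mathlib
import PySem

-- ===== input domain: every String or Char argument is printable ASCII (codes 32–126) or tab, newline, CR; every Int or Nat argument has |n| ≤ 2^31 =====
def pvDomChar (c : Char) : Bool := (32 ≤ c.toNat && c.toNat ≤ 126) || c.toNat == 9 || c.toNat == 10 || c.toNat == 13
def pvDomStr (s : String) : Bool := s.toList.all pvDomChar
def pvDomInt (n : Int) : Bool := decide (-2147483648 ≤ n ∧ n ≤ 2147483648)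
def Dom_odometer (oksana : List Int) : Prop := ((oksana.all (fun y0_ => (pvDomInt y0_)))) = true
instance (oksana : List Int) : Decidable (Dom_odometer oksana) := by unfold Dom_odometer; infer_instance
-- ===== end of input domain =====

-- B replaces A's scatter pass into v/t lists plus its duplicated summing loops by one
-- pass over the index pairs (2k, 2k+1) with a running previous time (objective: simpler).

-- ===== PORT A =====
-- the summing loop A writes twice (once per length-comparison branch); indices are in range,
-- so Python's v[i]/t[i] is ported exactly as getD
def odometerSum (v t : List Int) (n : Nat) : Int :=
  (List.range n).foldl (fun res i =>
    let V := v.getD i 0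
    let T := if i = 0 then t.getD i 0
             else (let T0 := t.getD i 0 - t.getD (i-1) 0; if T0 < 0 then 0 else T0)
    T * V + res) 0

def odometer (oksana : List Int) : Int :=
  -- first loop: scatter oksana into v (even positions) and t (odd positions)
  let vt := (List.range oksana.length).foldl (fun (vt : List Int × List Int) i =>
    if i = 0 then (vt.1 ++ [oksana.getD i 0], vt.2)
    else if i = 1 then (vt.1, vt.2 ++ [oksana.getD i 0])
    else if i % 2 = 0 then (vt.1 ++ [oksana.getD i 0], vt.2)
    else (vt.1, vt.2 ++ [oksana.getD i 0])) ([], [])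
  let v := vt.1
  let t := vt.2
  if v.length = t.length then odometerSum v t v.length
  else if v.length > t.length then odometerSum v t t.length
  else 0

-- ===== PORT B =====
-- one pass; state = (res, prev); Python's oksana[2*k] etc. are in range, ported as getD
def odometer_alt (oksana : List Int) : Int :=
  ((List.range (oksana.length / 2)).foldl (fun (st : Int × Int) k =>
    let V := oksana.getD (2 * k) 0
    let T := oksana.getD (2 * k + 1) 0
    let dt := if k = 0 then T else max 0 (T - st.2)
    (st.1 + V * dt, T)) (0, 0)).1

-- ===== PRECONDITION & SPEC =====
def Spec_odometer (oksana : List Int) (out : Int) : Prop := out = odometer_alt oksana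
instance (oksana : List Int) (out : Int) : Decidable (Spec_odometer oksana out) := by unfold Spec_odometer; infer_instance

-- ===== CLAIM (what is proved, stated in full; the proofs are below) =====
def Claim_equal_odometer : Prop := ∀ (oksana : List Int), Dom_odometer oksana → Spec_odometer oksana (odometer oksana)

-- ===== LEMMAS AND PROOFS =====

theorem foldl_congr_mem'' {α β : Type} (l : List α) (f g : β → α → β) (init : β)
    (h : ∀ acc x, x ∈ l → f acc x = g acc x) : l.foldl f init = l.foldl g init := by
  induction l generalizing init with
  | nil => rfl
  | cons a l ih =>
    simp only [List.foldl_cons]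
    rw [h init a (List.mem_cons_self ..)]
    exact ih _ (fun acc x hx => h acc x (List.mem_cons_of_mem _ hx))

theorem getD_map_range' (f : Nat → Int) (a i : Nat) (h : i < a) :
    ((List.range a).map f).getD i 0 = f i := by
  simp [List.getD_eq_getElem?_getD, h]

-- the scatter loop builds exactly the even- and odd-indexed elements
theorem build_eq (L : List Int) (n : Nat) :
    (List.range n).foldl (fun (vt : List Int × List Int) i =>
      if i = 0 then (vt.1 ++ [L.getD i 0], vt.2)
      else if i = 1 then (vt.1, vt.2 ++ [L.getD i 0])
      else if i % 2 = 0 then (vt.1 ++ [L.getD i 0], vt.2)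
      else (vt.1, vt.2 ++ [L.getD i 0])) ([], [])
    = ((List.range ((n + 1) / 2)).map (fun k => L.getD (2 * k) 0),
       (List.range (n / 2)).map (fun k => L.getD (2 * k + 1) 0)) := by
  induction n with
  | zero => simp
  | succ n ih =>
    rw [List.range_succ, List.foldl_append, ih]
    simp only [List.foldl_cons, List.foldl_nil]
    rcases Nat.eq_zero_or_pos n with h0 | hpos
    · subst h0; simp
    rcases Nat.eq_or_lt_of_le hpos with h1 | h2
    · simp [← h1]
    have hn0 : n ≠ 0 := by omega
    have hn1 : n ≠ 1 := by omega
    rcases Nat.even_or_odd n with he | ho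
    · have hmod : n % 2 = 0 := Nat.even_iff.mp he
      have hv : (n + 1 + 1) / 2 = (n + 1) / 2 + 1 := by omega
      have ht : (n + 1) / 2 = n / 2 := by omega
      have hk : 2 * ((n + 1) / 2) = n := by omega
      simp only [hn0, hn1, hmod, if_false, hv, ht,
        List.range_succ, List.map_append, List.map_cons, List.map_nil]
      have h2k : 2 * (n / 2) = n := by omega
      rw [h2k]
      simp
    · have hmod : n % 2 = 1 := Nat.odd_iff.mp ho
      have hmod' : ¬ (n % 2 = 0) := by omega
      have hv : (n + 1 + 1) / 2 = (n + 1) / 2 := by omega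
      have ht : (n + 1) / 2 = n / 2 + 1 := by omega
      have hk : 2 * (n / 2) + 1 = n := by omega
      simp only [hn0, hn1, hmod', if_false, ht,
        List.range_succ, List.map_append, List.map_cons, List.map_nil]
      rw [hv, ht, List.range_succ, List.map_append]
      simp [hk]

-- the fused one-pass fold computes A's summing loop (prev tracks the last raw time)
theorem core (f g : Nat → Int) (m : Nat) :
    (List.range m).foldl (fun (st : Int × Int) k =>
      (st.1 + f k * (if k = 0 then g k else max 0 (g k - st.2)), g k)) (0, 0)
    = ((List.range m).foldl (fun res i =>
        (if i = 0 then g i else (let T0 := g i - g (i - 1); if T0 < 0 then 0 else T0)) * f i + res) 0,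
       if m = 0 then 0 else g (m - 1)) := by
  induction m with
  | zero => simp
  | succ m ih =>
    rw [List.range_succ, List.foldl_append, List.foldl_append, ih]
    simp only [List.foldl_cons, List.foldl_nil]
    rcases Nat.eq_zero_or_pos m with h0 | hpos
    · subst h0; simp; ring
    have hm : m ≠ 0 := by omega
    simp only [hm, if_false]
    simp only [Prod.mk.injEq]
    refine ⟨?_, by simp⟩
    rcases lt_or_ge (g m - g (m - 1)) 0 with h | h
    · rw [if_pos h, max_eq_left (by omega)]; ring
    · rw [if_neg (not_lt.mpr h), max_eq_right h]; ring

theorem odometer_eq_sum (L : List Int) :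
    odometer L = odometerSum ((List.range ((L.length + 1) / 2)).map (fun k => L.getD (2 * k) 0))
      ((List.range (L.length / 2)).map (fun k => L.getD (2 * k + 1) 0)) (L.length / 2) := by
  unfold odometer
  rw [build_eq]
  simp only [List.length_map, List.length_range]
  by_cases h : (L.length + 1) / 2 = L.length / 2
  · rw [if_pos h, h]
  · have hgt : (L.length + 1) / 2 > L.length / 2 := by omega
    rw [if_neg h, if_pos hgt]

-- ===== VERDICT (by name: the statement is the Claim_ definition above) =====
theorem odometer_spec : Claim_equal_odometer := by
  intro L _
  show odometer L = odometer_alt L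
  rw [odometer_eq_sum]
  unfold odometer_alt odometerSum
  set n := L.length / 2 with hn
  have hA : (List.range n).foldl (fun res i =>
      let V := ((List.range ((L.length + 1) / 2)).map (fun k => L.getD (2 * k) 0)).getD i 0
      let T := if i = 0 then ((List.range n).map (fun k => L.getD (2 * k + 1) 0)).getD i 0
               else (let T0 := ((List.range n).map (fun k => L.getD (2 * k + 1) 0)).getD i 0
                       - ((List.range n).map (fun k => L.getD (2 * k + 1) 0)).getD (i - 1) 0;
                     if T0 < 0 then 0 else T0)
      T * V + res) 0
    = (List.range n).foldl (fun res i =>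
      (if i = 0 then L.getD (2 * i + 1) 0
       else (let T0 := L.getD (2 * i + 1) 0 - L.getD (2 * (i - 1) + 1) 0; if T0 < 0 then 0 else T0))
        * L.getD (2 * i) 0 + res) 0 := by
    apply foldl_congr_mem''
    intro acc i hi
    have him : i < n := List.mem_range.mp hi
    have hiv : i < (L.length + 1) / 2 := by omega
    rw [getD_map_range' _ _ _ hiv, getD_map_range' _ _ _ him]
    rcases Nat.eq_zero_or_pos i with h0 | hpos
    · simp [h0]
    · have hne : i ≠ 0 := by omega
      have hprev : i - 1 < n := by omega
      simp only [hne, if_false]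
      rw [getD_map_range' _ _ _ hprev]
  rw [hA]
  rw [core (fun k => L.getD (2 * k) 0) (fun k => L.getD (2 * k + 1) 0) n]
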